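-- pv_equiv track=rewrite | github.com/4amirhosein/AI_homework | eight_queen.py | heursitic
-- ===== SOURCE A (Python) =====
-- from copy import copy
--
-- def heursitic(board):
--     threats = 0
--
--     for index in board:
--         sample_board = copy(board)
--         sample_board.remove(index)
--         for queen in sample_board:
--             if(index[0] == queen[0] ):
--                 threats += 1
--                 break
--             elif(index[1] == queen[1]):
--                 threats += 1
--                 break
--             elif( index[0] - index[1] == queen[0] - queen[1] ):
--                 threats += 1
--                 break
--             elif( index[0] + index[1] == queen[0] + queen[1] ):
--                 threats += 1
--                 break
--     return threats
-- ===== SOURCE B (Python) =====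
-- def heursitic(board):
--     rows = {}
--     cols = {}
--     diag = {}
--     anti = {}
--     for queen in board:
--         r, c = queen[0], queen[1]
--         rows[r] = rows.get(r, 0) + 1
--         cols[c] = cols.get(c, 0) + 1
--         diag[r - c] = diag.get(r - c, 0) + 1
--         anti[r + c] = anti.get(r + c, 0) + 1
--     threats = 0
--     for queen in board:
--         r, c = queen[0], queen[1]
--         if rows[r] > 1 or cols[c] > 1 or diag[r - c] > 1 or anti[r + c] > 1:
--             threats += 1
--     return threats
-- ===== Notes on version B (the rewrite author's own statement) =====
-- stated objective: faster
-- what changed: Replaced the per-queen rescan of the whole board (copy+remove+inner loop) by one pass that hash-counts queens per row/column/diagonal/antidiagonal and a second pass counting queens whose row, column, diagonal or antidiagonal count exceeds 1.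
import Mathlib
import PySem

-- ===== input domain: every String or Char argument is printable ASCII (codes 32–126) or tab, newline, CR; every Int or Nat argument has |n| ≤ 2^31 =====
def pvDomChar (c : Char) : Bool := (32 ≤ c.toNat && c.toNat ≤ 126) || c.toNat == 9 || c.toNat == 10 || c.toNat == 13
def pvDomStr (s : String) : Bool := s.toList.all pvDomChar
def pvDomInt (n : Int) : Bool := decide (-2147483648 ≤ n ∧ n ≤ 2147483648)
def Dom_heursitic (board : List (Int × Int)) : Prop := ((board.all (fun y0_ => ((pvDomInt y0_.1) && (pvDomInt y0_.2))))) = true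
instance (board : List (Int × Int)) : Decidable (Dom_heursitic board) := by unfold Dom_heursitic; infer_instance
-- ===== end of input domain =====

-- B counts queens per row/column/diagonal/antidiagonal in one pass, then counts queens with a shared key;
-- goal: asymptotically faster than A's per-queen rescan of the board.

-- ===== PORT A =====
-- the inner 'for queen in sample_board' loop with its break: returns true as soon as some queen threatens idx
def heursiticScan (idx : Int × Int) : List (Int × Int) → Bool
  | [] => false
  | queen :: rest =>
    if idx.1 = queen.1 then true
    else if idx.2 = queen.2 then true
    else if idx.1 - idx.2 = queen.1 - queen.2 then true
    else if idx.1 + idx.2 = queen.1 + queen.2 then true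
    else heursiticScan idx rest

def heursitic (board : List (Int × Int)) : Int :=
  board.foldl
    (fun threats index =>
      -- sample_board = copy(board); sample_board.remove(index): index ∈ board here, so
      -- list.remove never raises and removes the first element equal to index = List.erase (exact)
      let sample_board := board.erase index
      if heursiticScan index sample_board then threats + 1 else threats)
    0

-- ===== PORT B =====
-- the counting pass: one fold building the four counter dicts (rows, cols, diag, anti)
def heursiticStep (s : PySem.Dict Int Int × PySem.Dict Int Int × PySem.Dict Int Int × PySem.Dict Int Int)
    (q : Int × Int) : PySem.Dict Int Int × PySem.Dict Int Int × PySem.Dict Int Int × PySem.Dict Int Int :=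
  (s.1.insert q.1 (s.1.getD q.1 0 + 1),
   s.2.1.insert q.2 (s.2.1.getD q.2 0 + 1),
   s.2.2.1.insert (q.1 - q.2) (s.2.2.1.getD (q.1 - q.2) 0 + 1),
   s.2.2.2.insert (q.1 + q.2) (s.2.2.2.getD (q.1 + q.2) 0 + 1))

def heursitic_alt (board : List (Int × Int)) : Int :=
  let ds := board.foldl heursiticStep (PySem.Dict.empty, PySem.Dict.empty, PySem.Dict.empty, PySem.Dict.empty)
  board.foldl
    (fun threats q =>
      if ds.1.getD q.1 0 > 1 ∨ ds.2.1.getD q.2 0 > 1 ∨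
         ds.2.2.1.getD (q.1 - q.2) 0 > 1 ∨ ds.2.2.2.getD (q.1 + q.2) 0 > 1
      then threats + 1 else threats)
    0

-- ===== PRECONDITION & SPEC =====
def Spec_heursitic (board : List (Int × Int)) (out : Int) : Prop := out = heursitic_alt board
instance (board : List (Int × Int)) (out : Int) : Decidable (Spec_heursitic board out) := by unfold Spec_heursitic; infer_instance

-- ===== CLAIM (what is proved, stated in full; the proofs are below) =====
def Claim_equal_heursitic : Prop := ∀ (board : List (Int × Int)), Dom_heursitic board → Spec_heursitic board (heursitic board)

-- ===== LEMMAS AND PROOFS =====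

-- the four components of B's counting fold are plain counter folds over the mapped keys
theorem heursiticStep_foldl (l : List (Int × Int))
    (d1 d2 d3 d4 : PySem.Dict Int Int) :
    l.foldl heursiticStep (d1, d2, d3, d4) =
      ((l.map Prod.fst).foldl (fun d x => d.insert x (d.getD x 0 + 1)) d1,
       (l.map Prod.snd).foldl (fun d x => d.insert x (d.getD x 0 + 1)) d2,
       (l.map (fun q => q.1 - q.2)).foldl (fun d x => d.insert x (d.getD x 0 + 1)) d3,
       (l.map (fun q => q.1 + q.2)).foldl (fun d x => d.insert x (d.getD x 0 + 1)) d4) := by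
  induction l generalizing d1 d2 d3 d4 with
  | nil => rfl
  | cons q rest ih => simp [heursiticStep, ih]

-- A's inner scan finds a queen threatening idx iff one exists in the list
theorem heursiticScan_iff (idx : Int × Int) (l : List (Int × Int)) :
    heursiticScan idx l = true ↔
      ∃ q ∈ l, idx.1 = q.1 ∨ idx.2 = q.2 ∨ idx.1 - idx.2 = q.1 - q.2 ∨ idx.1 + idx.2 = q.1 + q.2 := by
  induction l with
  | nil => simp [heursiticScan]
  | cons q rest ih =>
    simp only [heursiticScan, List.mem_cons]
    split_ifs with h1 h2 h3 h4
    · simp [h1]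
    · simp [h2]
    · simp [h3]
    · simp [h4]
    · rw [ih]
      constructor
      · rintro ⟨y, hy, h⟩; exact ⟨y, Or.inr hy, h⟩
      · rintro ⟨y, hy, h⟩
        rcases hy with rfl | hy
        · tauto
        · exact ⟨y, hy, h⟩

-- counting the key of a member: the whole board counts one more than the board with that member erased
theorem count_map_erase (f : (Int × Int) → Int) (board : List (Int × Int)) (x : Int × Int)
    (hx : x ∈ board) :
    (board.map f).count (f x) = ((board.erase x).map f).count (f x) + 1 := by
  have hperm : board.Perm (x :: board.erase x) := List.perm_cons_erase hx
  have := (hperm.map f).count_eq (f x)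
  simpa using this

-- key ‘count > 1’ ↔ some OTHER queen (in board.erase x) shares the key
theorem count_gt_one_iff (f : (Int × Int) → Int) (board : List (Int × Int)) (x : Int × Int)
    (hx : x ∈ board) :
    (1 < (board.map f).count (f x)) ↔ ∃ q ∈ board.erase x, f x = f q := by
  rw [count_map_erase f board x hx]
  constructor
  · intro h
    have hpos : 0 < ((board.erase x).map f).count (f x) := by omega
    rcases List.mem_map.mp (List.count_pos_iff.mp hpos) with ⟨q, hq, hfq⟩
    exact ⟨q, hq, hfq.symm⟩
  · rintro ⟨q, hq, hfq⟩
    have : f x ∈ (board.erase x).map f := List.mem_map.mpr ⟨q, hq, hfq.symm⟩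
    have := List.count_pos_iff.mpr this
    omega

-- both folds count members satisfying pointwise-equal predicates, so they are equal
theorem foldl_if_congr (p q : (Int × Int) → Prop) [DecidablePred p] [DecidablePred q]
    (l : List (Int × Int)) (h : ∀ x ∈ l, p x ↔ q x) (a : Int) :
    l.foldl (fun t x => if p x then t + 1 else t) a =
      l.foldl (fun t x => if q x then t + 1 else t) a := by
  induction l generalizing a with
  | nil => rfl
  | cons x rest ih =>
    simp only [List.foldl_cons]
    have hx := h x (by simp)
    have hrest : ∀ y ∈ rest, p y ↔ q y := fun y hy => h y (List.mem_cons_of_mem _ hy)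
    by_cases hp : p x
    · rw [if_pos hp, if_pos (hx.mp hp)]; exact ih hrest _
    · rw [if_neg hp, if_neg (fun hq => hp (hx.mpr hq))]; exact ih hrest _

-- ===== VERDICT (by name: the statement is the Claim_ definition above) =====
theorem heursitic_spec : Claim_equal_heursitic := by
  intro board _
  unfold Spec_heursitic heursitic heursitic_alt
  rw [heursiticStep_foldl]
  simp only [PySem.Dict.getD_foldl_insert_add_one, PySem.Dict.getD_empty, zero_add, gt_iff_lt]
  refine foldl_if_congr _ _ board (fun x hx => ?_) 0
  rw [show ((heursiticScan x (board.erase x)) = true) ↔ _ from heursiticScan_iff x (board.erase x)]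
  simp only [Nat.one_lt_cast]
  simp only [count_gt_one_iff Prod.fst board x hx, count_gt_one_iff Prod.snd board x hx,
    count_gt_one_iff (fun q => q.1 - q.2) board x hx, count_gt_one_iff (fun q => q.1 + q.2) board x hx]
  simp [exists_or, and_or_left]
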